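-- pv_equiv track=rewrite | github.com/PedroMussato/comparelines | joins.py | right_join
-- ===== SOURCE A (Python) =====
-- def right_join(left_file_lines,right_file_lines,unique=False,case_sensitive=True):
--     result_lines = []
--
--     if case_sensitive:
--         for i in right_file_lines:
--             if i in left_file_lines:
--                 result_lines.append(f'{i}|{i}')
--             else:
--                 result_lines.append(f'{i}|{None}')
--     else:
--         for i in right_file_lines:
--             found = False
--             lower_i = i.lower()
--
--             for j in left_file_lines:
--                 if lower_i == j.lower():
--                     result_lines.append(f'{i}|{j}')
--                     found = True
--                     break
--
--             if not found:
--                 result_lines.append(f'{i}|{None}')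
--
--     if unique:
--         result_lines = list(dict.fromkeys(result_lines))
--
--     return result_lines
-- ===== SOURCE B (Python) =====
-- def right_join(left_file_lines, right_file_lines, unique=False, case_sensitive=True):
--     if case_sensitive:
--         left_set = set(left_file_lines)
--         rows = [f'{i}|{i}' if i in left_set else f'{i}|None'
--                 for i in right_file_lines]
--     else:
--         index = {}
--         for j in left_file_lines:
--             k = j.lower()
--             if k not in index:
--                 index[k] = j
--         rows = []
--         for i in right_file_lines:
--             j = index.get(i.lower())
--             rows.append(f'{i}|{j}' if j is not None else f'{i}|None')
--
--     if unique:
--         seen = set()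
--         out = []
--         for r in rows:
--             if r not in seen:
--                 seen.add(r)
--                 out.append(r)
--         return out
--     return rows
-- ===== Notes on version B (the rewrite author's own statement) =====
-- stated objective: faster
-- what changed: Replaces the per-right-line scan of left_file_lines (list membership / inner break-loop) with a set, resp. a lower->first-left dict built once, and the dict.fromkeys dedup with an explicit seen-set pass.
import Mathlib
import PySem

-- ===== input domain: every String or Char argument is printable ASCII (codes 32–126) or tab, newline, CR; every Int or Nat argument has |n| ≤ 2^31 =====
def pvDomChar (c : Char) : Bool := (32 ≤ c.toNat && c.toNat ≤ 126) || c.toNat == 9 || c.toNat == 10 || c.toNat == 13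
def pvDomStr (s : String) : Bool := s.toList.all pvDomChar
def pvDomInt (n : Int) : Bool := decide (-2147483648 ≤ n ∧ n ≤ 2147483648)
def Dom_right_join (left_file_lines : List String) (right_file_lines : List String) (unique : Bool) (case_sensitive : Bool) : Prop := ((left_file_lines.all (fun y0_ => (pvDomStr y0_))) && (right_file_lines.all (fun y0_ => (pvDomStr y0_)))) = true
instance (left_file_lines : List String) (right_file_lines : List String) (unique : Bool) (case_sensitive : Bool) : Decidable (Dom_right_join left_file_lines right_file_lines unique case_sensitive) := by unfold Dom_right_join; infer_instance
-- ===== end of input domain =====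

-- B replaces A's O(n*m) per-right-line scans of left_file_lines with a set / lower->first-left
-- dict built once (O(n+m)), and the dict.fromkeys dedup with an explicit seen-set pass.

-- ===== PORT A =====
-- inner 'for j in left: if lower_i == j.lower(): …; break' of A's case-insensitive branch
def rjFindLeft (left : List String) (lower_i : String) : Option String :=
  match left with
  | [] => none
  | j :: rest => if lower_i = PySem.Str.lower j then some j else rjFindLeft rest lower_i

def right_join (left_file_lines : List String) (right_file_lines : List String) (unique : Bool) (case_sensitive : Bool) : List String :=
  let result_lines : List String :=
    if case_sensitive then
      right_file_lines.foldl (fun acc i =>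
        acc ++ [if left_file_lines.contains i then i ++ "|" ++ i else i ++ "|None"]) []
    else
      right_file_lines.foldl (fun acc i =>
        acc ++ [match rjFindLeft left_file_lines (PySem.Str.lower i) with
                | some j => i ++ "|" ++ j
                | none => i ++ "|None"]) []
  if unique then PySem.List.dedup result_lines else result_lines

-- ===== PORT B =====
-- 'index = {}; for j in left: k = j.lower(); if k not in index: index[k] = j'
def rjIndex (left : List String) : PySem.Dict String String :=
  left.foldl (fun d j =>
    let k := PySem.Str.lower j
    if d.contains k then d else d.insert k j) PySem.Dict.empty

-- 'seen = set(); out = []; for r in rows: if r not in seen: seen.add(r); out.append(r)'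
def rjDedup (rows : List String) (seen : PySem.Set String) (out : List String) : List String :=
  match rows with
  | [] => out
  | r :: rest =>
      if seen.contains r then rjDedup rest seen out
      else rjDedup rest (PySem.Set.add seen r) (out ++ [r])

def right_join_alt (left_file_lines : List String) (right_file_lines : List String) (unique : Bool) (case_sensitive : Bool) : List String :=
  let rows : List String :=
    if case_sensitive then
      let left_set : PySem.Set String := PySem.Set.ofList left_file_lines
      right_file_lines.map (fun i =>
        if left_set.contains i then i ++ "|" ++ i else i ++ "|None")
    else
      let index := rjIndex left_file_lines
      right_file_lines.map (fun i =>
        match index.get? (PySem.Str.lower i) with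
        | some j => i ++ "|" ++ j
        | none => i ++ "|None")
  if unique then rjDedup rows PySem.Set.empty [] else rows

-- ===== PRECONDITION & SPEC =====
def Spec_right_join (left_file_lines : List String) (right_file_lines : List String) (unique : Bool) (case_sensitive : Bool) (out : List String) : Prop := out = right_join_alt left_file_lines right_file_lines unique case_sensitive
instance (left_file_lines : List String) (right_file_lines : List String) (unique : Bool) (case_sensitive : Bool) (out : List String) : Decidable (Spec_right_join left_file_lines right_file_lines unique case_sensitive out) := by unfold Spec_right_join; infer_instance

-- ===== CLAIM (what is proved, stated in full; the proofs are below) =====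
def Claim_equal_right_join : Prop := ∀ (left_file_lines : List String) (right_file_lines : List String) (unique : Bool) (case_sensitive : Bool), Dom_right_join left_file_lines right_file_lines unique case_sensitive → Spec_right_join left_file_lines right_file_lines unique case_sensitive (right_join left_file_lines right_file_lines unique case_sensitive)

-- ===== LEMMAS AND PROOFS =====

-- B's set/list membership agree with A's 'i in left_file_lines'
theorem rj_contains_ofList (L : List String) (i : String) :
    (PySem.Set.ofList L).contains i = L.contains i := by
  simp [PySem.Set.contains, PySem.Set.mem_ofList]

-- the dict built by B answers exactly what A's first-match scan finds
theorem rj_get_fold (L : List String) (d : PySem.Dict String String) (k : String) :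
    (L.foldl (fun d j =>
      let k := PySem.Str.lower j
      if d.contains k then d else d.insert k j) d).get? k =
    match d.get? k with
    | some v => some v
    | none => rjFindLeft L k := by
  induction L generalizing d with
  | nil => rcases h : d.get? k with _ | v <;> simp [h, rjFindLeft]
  | cons j rest ih =>
    simp only [List.foldl_cons, rjFindLeft]
    rw [ih]
    by_cases hc : d.contains (PySem.Str.lower j)
    · rw [if_pos hc]
      rcases h : d.get? (PySem.Str.lower j) with _ | v
      · rw [PySem.Dict.contains_eq_isSome_get?, h] at hc; simp at hc
      · by_cases hk : k = PySem.Str.lower j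
        · subst hk; simp [h]
        · simp [hk]
    · rw [if_neg hc]
      by_cases hk : k = PySem.Str.lower j
      · subst hk
        rw [PySem.Dict.contains_eq_isSome_get?] at hc
        simp only [Bool.not_eq_true, Option.isSome_eq_false_iff, Option.isNone_iff_eq_none] at hc
        simp [PySem.Dict.get?_insert_self, hc]
      · rw [PySem.Dict.get?_insert_of_ne _ _ hk]
        simp [hk]

theorem rj_get_index (L : List String) (k : String) :
    (rjIndex L).get? k = rjFindLeft L k := by
  unfold rjIndex; rw [rj_get_fold]; simp [PySem.Dict.get?_empty]

-- B's seen-set dedup loop computes list(dict.fromkeys(·)) when seen and out coincide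
theorem rj_dedup_eq (rows : List String) (s : PySem.Set String) :
    rjDedup rows s s = rows.foldl PySem.Set.add s := by
  induction rows generalizing s with
  | nil => simp [rjDedup]
  | cons r rest ih =>
    simp only [rjDedup, List.foldl_cons]
    by_cases hm : r ∈ s
    · have h1 : s.contains r = true := by simp [PySem.Set.contains, hm]
      have h2 : PySem.Set.add s r = s := by simp [PySem.Set.add, hm]
      rw [if_pos h1, h2, ih]
    · have h2 : PySem.Set.add s r = s ++ [r] := by simp [PySem.Set.add, hm]
      rw [if_neg (by simp [PySem.Set.contains, hm]), h2, ih]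

theorem right_join_spec_aux (L R : List String) (u c : Bool) :
    right_join L R u c = right_join_alt L R u c := by
  unfold right_join right_join_alt
  have hrows :
      (if c then
        R.foldl (fun acc i =>
          acc ++ [if L.contains i then i ++ "|" ++ i else i ++ "|None"]) []
      else
        R.foldl (fun acc i =>
          acc ++ [match rjFindLeft L (PySem.Str.lower i) with
                  | some j => i ++ "|" ++ j
                  | none => i ++ "|None"]) []) =
      (if c then
        R.map (fun i =>
          if (PySem.Set.ofList L).contains i then i ++ "|" ++ i else i ++ "|None")
      else
        R.map (fun i =>
          match (rjIndex L).get? (PySem.Str.lower i) with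
          | some j => i ++ "|" ++ j
          | none => i ++ "|None")) := by
    cases c
    · simp only [if_false, Bool.false_eq_true]
      rw [PySem.List.foldl_append_singleton_eq_map]
      exact List.map_congr_left (fun i _ => by rw [rj_get_index])
    · simp only [if_true]
      rw [PySem.List.foldl_append_singleton_eq_map]
      exact List.map_congr_left (fun i _ => by rw [rj_contains_ofList])
  simp only [hrows]
  cases u
  · simp
  · simp only [if_true]
    rw [PySem.List.dedup_eq_ofList, PySem.Set.ofList_eq_foldl, ← rj_dedup_eq]
    rfl

-- ===== VERDICT (by name: the statement is the Claim_ definition above) =====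
theorem right_join_spec : Claim_equal_right_join := by
  intro L R u c _
  unfold Spec_right_join
  exact right_join_spec_aux L R u c
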